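-- pv_equiv track=rewrite | github.com/EconomicScienceInstitute/computational-economics-mahjong-yixuan | src/backend/q_learning.py | hand_to_features
-- ===== SOURCE A (Python) =====
-- def hand_to_features(hand):
--     from collections import Counter
--     c = Counter(hand)
--     num_pairs = sum(1 for v in c.values() if v == 2)
--     num_triplets = sum(1 for v in c.values() if v == 3)
--     num_winds = sum(1 for t in hand if 27 <= t <= 30)
--     num_dragons = sum(1 for t in hand if 31 <= t <= 33)
--     return (num_pairs, num_triplets, num_winds, num_dragons)
-- ===== SOURCE B (Python) =====
-- def hand_to_features(hand):
--     s = sorted(hand)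
--     p = t = w = d = 0
--     i = 0
--     n = len(s)
--     while i < n:
--         j = i
--         while j < n and s[j] == s[i]:
--             j += 1
--         L = j - i
--         x = s[i]
--         if L == 2:
--             p += 1
--         if L == 3:
--             t += 1
--         if 27 <= x <= 30:
--             w += L
--         if 31 <= x <= 33:
--             d += L
--         i = j
--     return (p, t, w, d)
-- ===== Notes on version B (the rewrite author's own statement) =====
-- stated objective: alternative
-- what changed: Replaces the hash Counter plus four separate generator passes by sorting a copy of the hand and one run-length scan over the sorted tiles, reading pairs/triplets from run lengths and winds/dragons from the run's tile and length.
import Mathlib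
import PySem

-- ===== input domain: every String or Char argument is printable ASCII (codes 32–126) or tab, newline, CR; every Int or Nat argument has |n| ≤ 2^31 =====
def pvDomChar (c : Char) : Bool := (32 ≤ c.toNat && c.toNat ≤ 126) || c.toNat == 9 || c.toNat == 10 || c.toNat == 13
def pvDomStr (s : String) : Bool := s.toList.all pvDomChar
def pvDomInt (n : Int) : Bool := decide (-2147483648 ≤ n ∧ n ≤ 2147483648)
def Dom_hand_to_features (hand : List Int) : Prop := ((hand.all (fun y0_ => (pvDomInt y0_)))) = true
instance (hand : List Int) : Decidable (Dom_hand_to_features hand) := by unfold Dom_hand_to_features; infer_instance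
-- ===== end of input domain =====

-- B replaces A's hash Counter plus four generator passes by sorting a copy and one run-length scan (alternative decomposition; not claimed faster).

-- ===== PORT A =====
def hand_to_features (hand : List Int) : Int × Int × Int × Int :=
  let c := PySem.Dict.counter hand
  let num_pairs := c.values.foldl (fun acc v => if v = 2 then acc + 1 else acc) (0 : Int)
  let num_triplets := c.values.foldl (fun acc v => if v = 3 then acc + 1 else acc) (0 : Int)
  let num_winds := hand.foldl (fun acc t => if 27 ≤ t ∧ t ≤ 30 then acc + 1 else acc) (0 : Int)
  let num_dragons := hand.foldl (fun acc t => if 31 ≤ t ∧ t ≤ 33 then acc + 1 else acc) (0 : Int)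
  (num_pairs, num_triplets, num_winds, num_dragons)

-- ===== PORT B =====
-- Source B's while loop over the sorted list: each step consumes one maximal run of equal tiles.
def hand_to_features_altRun : List Int → Int → Int → Int → Int → Int × Int × Int × Int
  | [], p, t, w, d => (p, t, w, d)
  | x :: rest, p, t, w, d =>
    let run := rest.takeWhile (fun y => y = x)
    let L : Int := (run.length : Int) + 1
    hand_to_features_altRun (rest.dropWhile (fun y => y = x))
      (if L = 2 then p + 1 else p)
      (if L = 3 then t + 1 else t)
      (if 27 ≤ x ∧ x ≤ 30 then w + L else w)
      (if 31 ≤ x ∧ x ≤ 33 then d + L else d)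
  termination_by s _ _ _ _ => s.length
  decreasing_by
    simp only [List.length_cons]
    exact Nat.lt_succ_of_le (List.length_dropWhile_le _ _)

def hand_to_features_alt (hand : List Int) : Int × Int × Int × Int :=
  hand_to_features_altRun (PySem.List.sorted hand (fun x => x) false) 0 0 0 0

-- ===== PRECONDITION & SPEC =====
def Spec_hand_to_features (hand : List Int) (out : Int × Int × Int × Int) : Prop := out = hand_to_features_alt hand
instance (hand : List Int) (out : Int × Int × Int × Int) : Decidable (Spec_hand_to_features hand out) := by unfold Spec_hand_to_features; infer_instance

-- ===== CLAIM (what is proved, stated in full; the proofs are below) =====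
def Claim_equal_hand_to_features : Prop := ∀ (hand : List Int), Dom_hand_to_features hand → Spec_hand_to_features hand (hand_to_features hand)

-- ===== LEMMAS AND PROOFS =====

-- number of distinct tiles with multiplicity exactly m
def pvMultiF (s : List Int) (m : Nat) : Int :=
  (((s.toFinset.filter (fun k => s.count k = m)).card : Nat) : Int)
def pvWindB (t : Int) : Bool := decide (27 ≤ t ∧ t ≤ 30)
def pvDragB (t : Int) : Bool := decide (31 ≤ t ∧ t ≤ 33)

-- the common characterisation both ports are reduced to
def pvQuad (s : List Int) : Int × Int × Int × Int :=
  (pvMultiF s 2, pvMultiF s 3, (s.countP pvWindB : Int), (s.countP pvDragB : Int))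

theorem pv_foldl_if (p : Int → Prop) [DecidablePred p] :
    ∀ (l : List Int) (a : Int),
      l.foldl (fun acc v => if p v then acc + 1 else acc) a = a + (l.countP (fun v => decide (p v)) : Int) := by
  intro l
  induction l with
  | nil => intro a; simp
  | cons x xs ih =>
    intro a
    by_cases h : p x <;> simp [List.foldl_cons, h, ih] <;> ring

theorem pv_countP_nodup (l : List Int) (hn : l.Nodup) (p : Int → Prop) [DecidablePred p] :
    (l.countP (fun v => decide (p v)) : Int) = ((l.toFinset.filter p).card : Int) := by
  rw [List.countP_eq_length_filter, ← List.toFinset_card_of_nodup (hn.filter _), List.toFinset_filter]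
  simp

theorem pv_counter_foldl (hand : List Int) (mI : Int) (mN : Nat) (hm : mI = (mN : Int)) :
    (PySem.Dict.counter hand).values.foldl (fun acc v => if v = mI then acc + 1 else acc) (0 : Int)
      = pvMultiF hand mN := by
  subst hm
  have hv : (PySem.Dict.counter hand).values = (PySem.Set.ofList hand : List Int).map (fun k => (hand.count k : Int)) := by
    simp only [PySem.Dict.values, PySem.Dict.items_counter, List.map_map]; rfl
  rw [hv, List.foldl_map, pv_foldl_if (p := fun k => (hand.count k : Int) = (mN : Int))]
  rw [pv_countP_nodup _ (PySem.Set.nodup_ofList hand)]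
  have ht : (PySem.Set.ofList hand : List Int).toFinset = hand.toFinset := by
    ext a; simp [PySem.Set.mem_ofList]
  rw [ht]
  unfold pvMultiF
  norm_num

theorem pv_A_eq_quad (hand : List Int) : hand_to_features hand = pvQuad hand := by
  unfold hand_to_features pvQuad
  dsimp only
  rw [pv_counter_foldl hand 2 2 (by norm_num), pv_counter_foldl hand 3 3 (by norm_num),
      pv_foldl_if (fun t => 27 ≤ t ∧ t ≤ 30) hand 0, pv_foldl_if (fun t => 31 ≤ t ∧ t ≤ 33) hand 0]
  norm_num
  constructor <;> (apply List.countP_congr; intro a _; simp [pvWindB, pvDragB])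

theorem pv_quad_perm (s hand : List Int) (h : s.Perm hand) : pvQuad s = pvQuad hand := by
  unfold pvQuad pvMultiF
  have hc : ∀ k, s.count k = hand.count k := fun k => h.count_eq k
  have h2 : ∀ m : Nat, Finset.filter (fun k => s.count k = m) hand.toFinset
      = Finset.filter (fun k => hand.count k = m) hand.toFinset :=
    fun m => Finset.filter_congr (fun k _ => by rw [hc k])
  have ht : s.toFinset = hand.toFinset := by ext a; simp [h.mem_iff]
  rw [h.countP_eq, h.countP_eq, ht, h2 2, h2 3]

-- countP of a constant-value list
theorem pv_countP_const (q : Int → Bool) (x : Int) (l : List Int) (h : ∀ y ∈ l, y = x) :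
    l.countP q = if q x then l.length else 0 := by
  by_cases hq : q x
  · simp only [hq, if_true]
    exact List.countP_eq_length.2 (fun a ha => (h a ha) ▸ hq)
  · simp only [hq, if_false]
    exact List.countP_eq_zero.2 (fun a ha => (h a ha) ▸ hq)

-- run decomposition of pvMultiF
theorem pv_multiF_step (x : Int) (run tail : List Int) (m : Nat)
    (hrun : ∀ y ∈ run, y = x) (hxt : x ∉ tail) :
    pvMultiF (x :: run ++ tail) m
      = (if run.length + 1 = m then 1 else 0) + pvMultiF tail m := by
  set s := x :: run ++ tail with hs
  have hcx : s.count x = run.length + 1 := by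
    simp only [hs, List.cons_append, List.count_cons, List.count_append]
    rw [List.count_eq_zero.2 hxt]
    have : run.count x = run.length := List.count_eq_length.2 (fun b hb => (hrun b hb).symm)
    simp [this]
  have hck : ∀ k, k ≠ x → s.count k = tail.count k := by
    intro k hk
    simp only [hs, List.cons_append, List.count_cons, List.count_append]
    have h0 : run.count k = 0 := List.count_eq_zero.2 (fun hkr => hk (hrun k hkr))
    simp [h0]
    exact fun h => hk h.symm
  have hts : s.toFinset = insert x tail.toFinset := by
    ext a
    simp only [hs, List.cons_append, List.toFinset_cons, List.toFinset_append,
      Finset.mem_insert, Finset.mem_union, List.mem_toFinset]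
    constructor
    · rintro (rfl | h | h)
      · exact Or.inl rfl
      · exact Or.inl (hrun a h)
      · exact Or.inr h
    · rintro (rfl | h)
      · exact Or.inl rfl
      · exact Or.inr (Or.inr h)
  have hxT : x ∉ tail.toFinset := by simpa using hxt
  unfold pvMultiF
  rw [hts, Finset.filter_insert]
  have hfc : Finset.filter (fun k => s.count k = m) tail.toFinset
      = Finset.filter (fun k => tail.count k = m) tail.toFinset := by
    apply Finset.filter_congr
    intro k hk
    have hkx : k ≠ x := fun h => hxT (h ▸ hk)
    rw [hck k hkx]
  rw [hfc, hcx]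
  by_cases hm : run.length + 1 = m
  · rw [if_pos hm, if_pos hm]
    rw [Finset.card_insert_of_notMem (fun h => hxT (Finset.mem_of_mem_filter _ h))]
    push_cast; ring
  · rw [if_neg hm, if_neg hm]; simp

theorem pv_not_mem_dropWhile (x : Int) : ∀ (rest : List Int), (∀ y ∈ rest, x ≤ y) →
    rest.Pairwise (· ≤ ·) → x ∉ rest.dropWhile (fun y => y = x) := by
  intro rest
  induction rest with
  | nil => intro _ _ h; simp [List.dropWhile] at h
  | cons a l ih =>
    intro hle hpw
    by_cases ha : a = x
    · rw [List.dropWhile_cons_of_pos (by simp [ha])]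
      exact ih (fun y hy => hle y (List.mem_cons_of_mem a hy)) (List.pairwise_cons.1 hpw).2
    · rw [List.dropWhile_cons_of_neg (by simp [ha])]
      intro hx
      rcases List.mem_cons.1 hx with rfl | hx'
      · exact ha rfl
      · have h1 : a ≤ x := (List.pairwise_cons.1 hpw).1 x hx'
        have h2 : x ≤ a := hle a List.mem_cons_self
        exact ha (le_antisymm h1 h2)

theorem pv_altRun_eq : ∀ (n : Nat) (s : List Int), s.length ≤ n → s.Pairwise (· ≤ ·) →
    ∀ p t w d : Int, hand_to_features_altRun s p t w d =
      (p + pvMultiF s 2, t + pvMultiF s 3, w + (s.countP pvWindB : Int), d + (s.countP pvDragB : Int)) := by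
  intro n
  induction n with
  | zero =>
    intro s hlen _ p t w d
    have : s = [] := List.eq_nil_of_length_eq_zero (Nat.le_zero.1 hlen)
    subst this
    simp [hand_to_features_altRun, pvMultiF]
  | succ n ih =>
    intro s hlen hpw p t w d
    match s with
    | [] => simp [hand_to_features_altRun, pvMultiF]
    | x :: rest =>
      set run := rest.takeWhile (fun y => y = x) with hrun_def
      set tail := rest.dropWhile (fun y => y = x) with htail_def
      have hsplit : rest = run ++ tail := (List.takeWhile_append_dropWhile).symm
      have hrunx : ∀ y ∈ run, y = x := by
        intro y hy
        have := List.mem_takeWhile_imp hy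
        simpa using this
      have hle : ∀ y ∈ rest, x ≤ y := (List.pairwise_cons.1 hpw).1
      have htail_sub : tail.Sublist rest := List.dropWhile_sublist _
      have htail_pw : tail.Pairwise (· ≤ ·) :=
        ((List.pairwise_cons.1 hpw).2).sublist htail_sub
      have hxt : x ∉ tail := by
        rw [htail_def]
        exact pv_not_mem_dropWhile x rest hle (List.pairwise_cons.1 hpw).2
      have htlen : tail.length ≤ n := by
        have h1 : tail.length ≤ rest.length := List.length_dropWhile_le _ _
        have h2 : rest.length ≤ n := by simpa using Nat.lt_succ_iff.1 (by simpa using hlen)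
        omega
      rw [hand_to_features_altRun]
      rw [ih tail htlen htail_pw]
      have hM2 := pv_multiF_step x run tail 2 hrunx hxt
      have hM3 := pv_multiF_step x run tail 3 hrunx hxt
      have hsrw : x :: rest = x :: run ++ tail := by rw [hsplit]; rfl
      have hW : ((x :: rest).countP pvWindB : Int)
          = (if pvWindB x then (run.length : Int) + 1 else 0) + (tail.countP pvWindB : Int) := by
        rw [hsrw]
        simp only [List.cons_append, List.countP_cons, List.countP_append]
        rw [pv_countP_const pvWindB x run hrunx]
        by_cases h : pvWindB x <;> simp [h] <;> push_cast <;> ring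
      have hD : ((x :: rest).countP pvDragB : Int)
          = (if pvDragB x then (run.length : Int) + 1 else 0) + (tail.countP pvDragB : Int) := by
        rw [hsrw]
        simp only [List.cons_append, List.countP_cons, List.countP_append]
        rw [pv_countP_const pvDragB x run hrunx]
        by_cases h : pvDragB x <;> simp [h] <;> push_cast <;> ring
      rw [hsrw] at *
      refine Prod.ext ?_ (Prod.ext ?_ (Prod.ext ?_ ?_))
      · show (if (run.length : Int) + 1 = 2 then p + 1 else p) + pvMultiF tail 2 = p + pvMultiF (x :: run ++ tail) 2
        rw [hM2]
        have : ((run.length : Int) + 1 = 2) ↔ (run.length + 1 = 2) := by omega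
        by_cases h : run.length + 1 = 2 <;> simp [this, h] <;> ring
      · show (if (run.length : Int) + 1 = 3 then t + 1 else t) + pvMultiF tail 3 = t + pvMultiF (x :: run ++ tail) 3
        rw [hM3]
        have : ((run.length : Int) + 1 = 3) ↔ (run.length + 1 = 3) := by omega
        by_cases h : run.length + 1 = 3 <;> simp [this, h] <;> ring
      · show (if 27 ≤ x ∧ x ≤ 30 then w + ((run.length : Int) + 1) else w) + ((tail.countP pvWindB : Int)) = w + (((x :: run ++ tail).countP pvWindB : Int))
        rw [hW]
        by_cases h : 27 ≤ x ∧ x ≤ 30 <;> simp [pvWindB, h] <;> ring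
      · show (if 31 ≤ x ∧ x ≤ 33 then d + ((run.length : Int) + 1) else d) + ((tail.countP pvDragB : Int)) = d + (((x :: run ++ tail).countP pvDragB : Int))
        rw [hD]
        by_cases h : 31 ≤ x ∧ x ≤ 33 <;> simp [pvDragB, h] <;> ring

-- ===== VERDICT (by name: the statement is the Claim_ definition above) =====
theorem hand_to_features_spec : Claim_equal_hand_to_features := by
  intro hand _
  unfold Spec_hand_to_features hand_to_features_alt
  have hperm := PySem.List.sorted_perm hand (fun x => x) false
  have hpw : (PySem.List.sorted hand (fun x => x) false).Pairwise (· ≤ ·) :=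
    PySem.List.sorted_pairwise hand (fun x => x)
  rw [pv_A_eq_quad, pv_altRun_eq _ _ (le_refl _) hpw, ← pv_quad_perm _ _ hperm]
  simp [pvQuad]
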